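-- pv_equiv track=rewrite | github.com/byAnh-dev/ku-schedule-builder | backend/src/catalog/meeting_parser.py | _parse_days
-- ===== SOURCE A (Python) =====
-- _TWO_CHAR: dict[str, str] = {
--     "Tu": "T",
--     "Th": "Th",
--     "Sa": "Sa",
--     "Su": "Su",
-- }
--
-- _ONE_CHAR: dict[str, str] = {
--     "M": "M",
--     "W": "W",
--     "F": "F",
-- }
--
-- def _parse_days(raw: str) -> list[str]:
--     """
--     Greedily split a concatenated day string into frontend DayOfWeek tokens.
--
--     Examples:
--         "TuTh"     -> ["T", "Th"]
--         "MWF"      -> ["M", "W", "F"]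
--         "MTuWThF"  -> ["M", "T", "W", "Th", "F"]
--         "Sa"       -> ["Sa"]
--     """
--     result: list[str] = []
--     i = 0
--     while i < len(raw):
--         two = raw[i : i + 2]
--         if two in _TWO_CHAR:
--             result.append(_TWO_CHAR[two])
--             i += 2
--         elif raw[i] in _ONE_CHAR:
--             result.append(_ONE_CHAR[raw[i]])
--             i += 1
--         else:
--             # Skip unrecognised characters rather than crash.
--             i += 1
--     return result
-- ===== SOURCE B (Python) =====
-- _TOKENS = ("Tu", "Th", "Sa", "Su", "M", "W", "F")
--
-- def _parse_days(raw: str) -> list[str]: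
--     # Pass 1: greedy tokenise by trying each alternative (two-char first) at the front.
--     tokens = []
--     rest = raw
--     while rest:
--         for tok in _TOKENS:
--             if rest.startswith(tok):
--                 tokens.append(tok)
--                 rest = rest[len(tok):]
--                 break
--         else:
--             rest = rest[1:]
--     # Pass 2: remap to frontend names (only 'Tu' changes).
--     return ['T' if tok == 'Tu' else tok for tok in tokens]
-- ===== Notes on version B (the rewrite author's own statement) =====
-- stated objective: alternative
-- what changed: Replaces A's index-based scan with two dict lookups per position by a two-pass tokeniser: greedily try each token alternative (two-char first) at the front of the remaining string via startswith and slice it off, then remap the tokens to frontend names in a separate mapping pass.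
import Mathlib
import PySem

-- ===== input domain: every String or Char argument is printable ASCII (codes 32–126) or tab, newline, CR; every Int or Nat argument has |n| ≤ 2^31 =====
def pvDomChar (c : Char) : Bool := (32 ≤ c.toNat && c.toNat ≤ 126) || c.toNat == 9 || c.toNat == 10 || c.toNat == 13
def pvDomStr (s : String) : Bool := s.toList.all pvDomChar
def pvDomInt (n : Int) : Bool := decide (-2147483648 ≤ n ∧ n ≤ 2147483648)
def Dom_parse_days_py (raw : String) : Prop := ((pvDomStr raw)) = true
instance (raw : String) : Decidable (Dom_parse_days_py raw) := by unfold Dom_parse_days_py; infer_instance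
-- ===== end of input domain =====

-- B replaces A's index-and-dict greedy scan by a two-pass tokeniser (try each token alternative
-- at the front, then remap "Tu"→"T" in a second pass); objective: alternative structure (it trades A's index arithmetic for suffix slicing).

-- ===== PORT A =====
def pvTwoChar : PySem.Dict String String :=
  PySem.Dict.mk [("Tu", "T"), ("Th", "Th"), ("Sa", "Sa"), ("Su", "Su")]

def pvOneChar : PySem.Dict String String :=
  PySem.Dict.mk [("M", "M"), ("W", "W"), ("F", "F")]

-- the while loop of A over the suffix raw[i:]; `two` = raw[i:i+2] (one char on the last position)
def pvGoA : List Char → List String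
  | [] => []
  | [c] =>
    match pvTwoChar.get? (String.ofList [c]) with
    | some v => [v]
    | none =>
      match pvOneChar.get? (String.ofList [c]) with
      | some v => [v]
      | none => []
  | c1 :: c2 :: rest =>
    match pvTwoChar.get? (String.ofList [c1, c2]) with
    | some v => v :: pvGoA rest
    | none =>
      match pvOneChar.get? (String.ofList [c1]) with
      | some v => v :: pvGoA (c2 :: rest)
      | none => pvGoA (c2 :: rest)

def parse_days_py (raw : String) : List String := pvGoA raw.toList

-- ===== PORT B =====
-- pass 1 of Source B: for tok in ('Tu','Th','Sa','Su','M','W','F'): if rest.startswith(tok) … else skip one char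
def pvTokensB : List Char → List String
  | [] => []
  | [c] =>
    if c = 'M' then ["M"] else if c = 'W' then ["W"] else if c = 'F' then ["F"] else []
  | c1 :: c2 :: rest =>
    if c1 = 'T' ∧ c2 = 'u' then "Tu" :: pvTokensB rest
    else if c1 = 'T' ∧ c2 = 'h' then "Th" :: pvTokensB rest
    else if c1 = 'S' ∧ c2 = 'a' then "Sa" :: pvTokensB rest
    else if c1 = 'S' ∧ c2 = 'u' then "Su" :: pvTokensB rest
    else if c1 = 'M' then "M" :: pvTokensB (c2 :: rest)
    else if c1 = 'W' then "W" :: pvTokensB (c2 :: rest)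
    else if c1 = 'F' then "F" :: pvTokensB (c2 :: rest)
    else pvTokensB (c2 :: rest)

-- pass 2 of Source B: ['T' if tok == 'Tu' else tok for tok in tokens]
def parse_days_py_alt (raw : String) : List String :=
  (pvTokensB raw.toList).map (fun t => if t = "Tu" then "T" else t)

-- ===== PRECONDITION & SPEC =====
def Spec_parse_days_py (raw : String) (out : List String) : Prop := out = parse_days_py_alt raw
instance (raw : String) (out : List String) : Decidable (Spec_parse_days_py raw out) := by unfold Spec_parse_days_py; infer_instance

-- ===== CLAIM (what is proved, stated in full; the proofs are below) =====
def Claim_equal_parse_days_py : Prop := ∀ (raw : String), Dom_parse_days_py raw → Spec_parse_days_py raw (parse_days_py raw)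

-- ===== LEMMAS AND PROOFS =====
lemma pv_two_lookup (a b : Char) : pvTwoChar.get? (String.ofList [a, b]) =
    if a = 'T' ∧ b = 'u' then some "T"
    else if a = 'T' ∧ b = 'h' then some "Th"
    else if a = 'S' ∧ b = 'a' then some "Sa"
    else if a = 'S' ∧ b = 'u' then some "Su"
    else none := by
  simp only [pvTwoChar, PySem.Dict.get?_mk_cons, beq_iff_eq,
    show ("Tu" : String) = String.ofList ['T', 'u'] from rfl,
    show ("Th" : String) = String.ofList ['T', 'h'] from rfl,
    show ("Sa" : String) = String.ofList ['S', 'a'] from rfl,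
    show ("Su" : String) = String.ofList ['S', 'u'] from rfl,
    String.ofList_inj]
  simp only [List.cons.injEq, and_true]
  split_ifs <;> simp_all [eq_comm, PySem.Dict.get?]

lemma pv_two_lookup_single (c : Char) : pvTwoChar.get? (String.ofList [c]) = none := by
  simp only [pvTwoChar, PySem.Dict.get?_mk_cons, beq_iff_eq,
    show ("Tu" : String) = String.ofList ['T', 'u'] from rfl,
    show ("Th" : String) = String.ofList ['T', 'h'] from rfl,
    show ("Sa" : String) = String.ofList ['S', 'a'] from rfl,
    show ("Su" : String) = String.ofList ['S', 'u'] from rfl,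
    String.ofList_inj]
  simp
  rfl

lemma pv_one_lookup (c : Char) : pvOneChar.get? (String.ofList [c]) =
    if c = 'M' then some "M" else if c = 'W' then some "W"
    else if c = 'F' then some "F" else none := by
  simp only [pvOneChar, PySem.Dict.get?_mk_cons, beq_iff_eq,
    show ("M" : String) = String.ofList ['M'] from rfl,
    show ("W" : String) = String.ofList ['W'] from rfl,
    show ("F" : String) = String.ofList ['F'] from rfl,
    String.ofList_inj]
  simp only [List.cons.injEq, and_true]
  split_ifs <;> simp_all [eq_comm, PySem.Dict.get?]

lemma pv_goA_eq_fuel : ∀ (n : Nat) (cs : List Char), cs.length ≤ n →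
    pvGoA cs = (pvTokensB cs).map (fun t => if t = "Tu" then "T" else t) := by
  intro n
  induction n with
  | zero =>
    intro cs h
    have : cs = [] := by cases cs <;> simp_all
    subst this; rfl
  | succ n ih =>
    intro cs h
    match cs with
    | [] => rfl
    | [c] =>
      simp only [pvGoA, pvTokensB, pv_two_lookup_single, pv_one_lookup]
      split_ifs <;> rfl
    | c1 :: c2 :: rest =>
      have h2 : rest.length ≤ n := by simp only [List.length_cons] at h; omega
      have h1 : (c2 :: rest).length ≤ n := by simp only [List.length_cons] at h ⊢; omega
      simp only [pvGoA, pvTokensB, pv_two_lookup, pv_one_lookup]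
      split_ifs <;> simp_all [ih rest h2, ih (c2 :: rest) h1]

-- ===== VERDICT (by name: the statement is the Claim_ definition above) =====
theorem parse_days_py_spec : Claim_equal_parse_days_py := by
  intro raw _
  unfold Spec_parse_days_py parse_days_py parse_days_py_alt
  exact pv_goA_eq_fuel raw.toList.length raw.toList (le_refl _)
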